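-- pv_equiv track=rewrite | github.com/7829hw/CT-SWcoding | 20221118/CT.9.4/solve.py | ver
-- ===== SOURCE A (Python) =====
-- def ver(n, m):
--     cnt = 0
--     pos = {}
--     for i in m:
--         if i[0] not in pos.keys():
--             pos[i[0]] = 1
--         else:
--             pos[i[0]] += 1
--     for i in list(pos.values()):
--         if i > 1:
--             cnt += 1
--     return cnt
-- ===== SOURCE B (Python) =====
-- def ver(n, m):
--     seen = set()
--     dup = set()
--     for i in m:
--         k = i[0]
--         if k in seen:
--             dup.add(k)
--         else:
--             seen.add(k)
--     return len(dup)
-- ===== Notes on version B (the rewrite author's own statement) =====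
-- stated objective: simpler
-- what changed: Replaces A's two-pass count-dict-then-scan-values with a single pass that maintains a seen set and a dup set, detecting duplicate first-elements incrementally and returning len(dup).
import Mathlib
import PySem

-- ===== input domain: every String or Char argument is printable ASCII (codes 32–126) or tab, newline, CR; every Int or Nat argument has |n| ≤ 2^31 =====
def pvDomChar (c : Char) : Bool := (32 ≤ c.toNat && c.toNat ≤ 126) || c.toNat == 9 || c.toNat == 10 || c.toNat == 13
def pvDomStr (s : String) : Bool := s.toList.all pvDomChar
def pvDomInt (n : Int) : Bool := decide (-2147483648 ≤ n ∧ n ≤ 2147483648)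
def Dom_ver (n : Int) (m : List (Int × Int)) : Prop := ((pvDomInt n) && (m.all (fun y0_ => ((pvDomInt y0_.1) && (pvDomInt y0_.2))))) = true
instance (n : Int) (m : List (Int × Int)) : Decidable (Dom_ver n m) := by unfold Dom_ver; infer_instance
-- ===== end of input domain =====

-- B replaces A's count-dict-then-scan-values (two passes) with a single pass keeping a
-- `seen` set and a `dup` set (objective: simpler).

-- ===== PORT A =====
def ver (_n : Int) (m : List (Int × Int)) : Int :=
  -- cnt = 0; pos = {}; for i in m: if i[0] not in pos.keys(): pos[i[0]] = 1 else: pos[i[0]] += 1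
  -- for i in list(pos.values()): if i > 1: cnt += 1; return cnt
  (m.foldl (fun (d : PySem.Dict Int Int) i =>
      if d.contains i.1 = false then d.insert i.1 1
      else d.insert i.1 (d.getD i.1 0 + 1)) PySem.Dict.empty).values.foldl
    (fun cnt v => if v > 1 then cnt + 1 else cnt) 0

-- ===== PORT B =====
def ver_alt (_n : Int) (m : List (Int × Int)) : Int :=
  -- seen = set(); dup = set(); for i in m: k = i[0]; if k in seen: dup.add(k) else: seen.add(k)
  -- return len(dup)
  PySem.Set.len
    (m.foldl (fun (p : PySem.Set Int × PySem.Set Int) i =>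
        if PySem.Set.contains p.1 i.1 then (p.1, PySem.Set.add p.2 i.1)
        else (PySem.Set.add p.1 i.1, p.2)) (PySem.Set.empty, PySem.Set.empty)).2

-- ===== PRECONDITION & SPEC =====
def Spec_ver (n : Int) (m : List (Int × Int)) (out : Int) : Prop := out = ver_alt n m
instance (n : Int) (m : List (Int × Int)) (out : Int) : Decidable (Spec_ver n m out) := by unfold Spec_ver; infer_instance

-- ===== CLAIM (what is proved, stated in full; the proofs are below) =====
def Claim_equal_ver : Prop := ∀ (n : Int) (m : List (Int × Int)), Dom_ver n m → Spec_ver n m (ver n m)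

-- ===== LEMMAS AND PROOFS =====

-- A's dict-building step is the standard counting step.
theorem stepA_eq :
    (fun (d : PySem.Dict Int Int) (i : Int × Int) =>
      if d.contains i.1 = false then d.insert i.1 1
      else d.insert i.1 (d.getD i.1 0 + 1))
    = fun d i => d.insert i.1 (d.getD i.1 0 + 1) := by
  funext d i
  by_cases h : d.contains i.1 = false
  · simp [h, PySem.Dict.getD_of_not_contains d 0 h]
  · simp [h]

-- The counting loop over values is countP.
theorem foldl_count_gt_one (l : List Int) (c : Int) :
    l.foldl (fun cnt v => if v > 1 then cnt + 1 else cnt) c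
      = c + ((l.countP (fun v => decide (1 < v)) : Nat) : Int) := by
  induction l generalizing c with
  | nil => simp
  | cons x t ih =>
    by_cases h : (1 : Int) < x
    · simp [List.foldl_cons, List.countP_cons, h, ih]; ring
    · simp [List.foldl_cons, List.countP_cons, h, ih]

-- A computes the number of distinct first-elements with count ≥ 2.
theorem ver_eq (n : Int) (m : List (Int × Int)) :
    ver n m = (((PySem.Set.ofList (m.map Prod.fst)).filter
        (fun k => decide (2 ≤ (m.map Prod.fst).count k))).length : Int) := by
  unfold ver
  rw [stepA_eq]
  rw [show (m.foldl (fun (d : PySem.Dict Int Int) i => d.insert i.1 (d.getD i.1 0 + 1)) PySem.Dict.empty)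
      = PySem.Dict.counter (m.map Prod.fst)
      from by rw [← PySem.Dict.foldl_insert_getD_add_one_eq_counter, List.foldl_map]]
  rw [foldl_count_gt_one]
  have hv : (PySem.Dict.counter (m.map Prod.fst)).values
      = (PySem.Set.ofList (m.map Prod.fst)).map (fun k => ((m.map Prod.fst).count k : Int)) := by
    show ((PySem.Dict.counter (m.map Prod.fst)).items.map (·.2)) = _
    rw [PySem.Dict.items_counter]
    simp [List.map_map, Function.comp]
  rw [hv, List.countP_map, ← List.countP_eq_length_filter]
  simp only [Int.zero_add]
  congr 1
  apply List.countP_congr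
  intro k _
  simp only [Function.comp, decide_eq_true_eq, decide_eq_decide]
  omega

-- B's loop invariant: after the fold, dup is nodup and contains exactly the keys
-- already in dup, or seen before and occurring in l, or occurring at least twice in l.
theorem B_loop (l : List (Int × Int)) (s d : PySem.Set Int)
    (hs : s.Nodup) (hd : d.Nodup) :
    (l.foldl (fun (p : PySem.Set Int × PySem.Set Int) i =>
        if PySem.Set.contains p.1 i.1 then (p.1, PySem.Set.add p.2 i.1)
        else (PySem.Set.add p.1 i.1, p.2)) (s, d)).2.Nodup ∧
    ∀ k, k ∈ (l.foldl (fun (p : PySem.Set Int × PySem.Set Int) i =>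
        if PySem.Set.contains p.1 i.1 then (p.1, PySem.Set.add p.2 i.1)
        else (PySem.Set.add p.1 i.1, p.2)) (s, d)).2 ↔
      (k ∈ d ∨ (k ∈ s ∧ k ∈ l.map Prod.fst) ∨ 2 ≤ (l.map Prod.fst).count k) := by
  induction l generalizing s d with
  | nil => simpa using hd
  | cons i t ih =>
    cases hc : PySem.Set.contains s i.1 with
    | true =>
      have hmem : i.1 ∈ s := (PySem.Set.contains_iff _ _).mp hc
      have hstep : ((i :: t).foldl (fun (p : PySem.Set Int × PySem.Set Int) i =>
          if PySem.Set.contains p.1 i.1 then (p.1, PySem.Set.add p.2 i.1)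
          else (PySem.Set.add p.1 i.1, p.2)) (s, d))
          = (t.foldl (fun (p : PySem.Set Int × PySem.Set Int) i =>
          if PySem.Set.contains p.1 i.1 then (p.1, PySem.Set.add p.2 i.1)
          else (PySem.Set.add p.1 i.1, p.2)) (s, PySem.Set.add d i.1)) := by
        rw [List.foldl_cons]
        congr 1
        simp
        intro h
        exact absurd hmem h
      rw [hstep]
      obtain ⟨h1, h2⟩ := ih s (PySem.Set.add d i.1) hs (PySem.Set.nodup_add _ _ hd)
      refine ⟨h1, fun k => ?_⟩
      rw [h2 k]
      by_cases hk : k = i.1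
      · subst hk
        simp [PySem.Set.mem_add, hmem]
      · have hk' : ¬(i.1 = k) := fun e => hk e.symm
        have hda : k ∈ PySem.Set.add d i.1 ↔ k ∈ d := by simp [PySem.Set.mem_add, hk]
        have hcc : List.count k (List.map Prod.fst (i :: t)) = List.count k (List.map Prod.fst t) := by
          simp [hk']
        have hmm : k ∈ List.map Prod.fst (i :: t) ↔ k ∈ List.map Prod.fst t := by
          simp [List.mem_cons, hk]
        rw [hda, hcc, hmm]
    | false =>
      have hmem : i.1 ∉ s := fun h => by
        rw [(PySem.Set.contains_iff s i.1).mpr h] at hc; exact Bool.true_eq_false.mp hc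
      have hstep : ((i :: t).foldl (fun (p : PySem.Set Int × PySem.Set Int) i =>
          if PySem.Set.contains p.1 i.1 then (p.1, PySem.Set.add p.2 i.1)
          else (PySem.Set.add p.1 i.1, p.2)) (s, d))
          = (t.foldl (fun (p : PySem.Set Int × PySem.Set Int) i =>
          if PySem.Set.contains p.1 i.1 then (p.1, PySem.Set.add p.2 i.1)
          else (PySem.Set.add p.1 i.1, p.2)) (PySem.Set.add s i.1, d)) := by
        rw [List.foldl_cons]
        congr 1
        simp
        intro h
        exact absurd h hmem
      rw [hstep]
      obtain ⟨h1, h2⟩ := ih (PySem.Set.add s i.1) d (PySem.Set.nodup_add _ _ hs) hd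
      refine ⟨h1, fun k => ?_⟩
      rw [h2 k]
      by_cases hk : k = i.1
      · subst hk
        have hs' : i.1 ∈ PySem.Set.add s i.1 := by simp [PySem.Set.mem_add]
        have h01 : i.1 ∈ List.map Prod.fst t ↔ 0 < List.count i.1 (List.map Prod.fst t) :=
          List.count_pos_iff.symm
        have hcc : List.count i.1 (List.map Prod.fst (i :: t))
            = List.count i.1 (List.map Prod.fst t) + 1 := by
          simp
        rw [hcc]
        constructor
        · rintro (h | ⟨_, ht⟩ | h)
          · exact Or.inl h
          · right; right; have := h01.mp ht; omega
          · right; right; omega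
        · rintro (h | ⟨hks, _⟩ | h)
          · exact Or.inl h
          · exact absurd hks hmem
          · by_cases h0 : 0 < List.count i.1 (List.map Prod.fst t)
            · exact Or.inr (Or.inl ⟨hs', h01.mpr h0⟩)
            · right; right; omega
      · have hk' : ¬(i.1 = k) := fun e => hk e.symm
        have hsa : k ∈ PySem.Set.add s i.1 ↔ k ∈ s := by simp [PySem.Set.mem_add, hk]
        have hcc : List.count k (List.map Prod.fst (i :: t)) = List.count k (List.map Prod.fst t) := by
          simp [hk']
        have hmm : k ∈ List.map Prod.fst (i :: t) ↔ k ∈ List.map Prod.fst t := by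
          simp [List.mem_cons, hk]
        rw [hsa, hcc, hmm]

-- B computes the same quantity.
theorem ver_alt_eq (n : Int) (m : List (Int × Int)) :
    ver_alt n m = (((PySem.Set.ofList (m.map Prod.fst)).filter
        (fun k => decide (2 ≤ (m.map Prod.fst).count k))).length : Int) := by
  unfold ver_alt
  obtain ⟨h1, h2⟩ := B_loop m PySem.Set.empty PySem.Set.empty List.nodup_nil List.nodup_nil
  unfold PySem.Set.len
  congr 1
  have hperm : (m.foldl (fun (p : PySem.Set Int × PySem.Set Int) i =>
        if PySem.Set.contains p.1 i.1 then (p.1, PySem.Set.add p.2 i.1)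
        else (PySem.Set.add p.1 i.1, p.2)) (PySem.Set.empty, PySem.Set.empty)).2.Perm
      ((PySem.Set.ofList (m.map Prod.fst)).filter
        (fun k => decide (2 ≤ (m.map Prod.fst).count k))) := by
    rw [List.perm_ext_iff_of_nodup h1 ((PySem.Set.nodup_ofList _).filter _)]
    intro k
    rw [h2 k, List.mem_filter, PySem.Set.mem_ofList]
    constructor
    · rintro (h | ⟨h, _⟩ | h)
      · simp at h
      · simp at h
      · exact ⟨List.count_pos_iff.mp (by omega), by simpa using h⟩
    · rintro ⟨_, h⟩
      right; right; simpa using h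
  exact hperm.length_eq

-- ===== VERDICT (by name: the statement is the Claim_ definition above) =====
theorem ver_spec : Claim_equal_ver := by
  intro n m _
  unfold Spec_ver
  rw [ver_eq, ver_alt_eq]
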